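-- pv_equiv track=rewrite | github.com/Jaykumaran/Complexity_Programming | GeeksForGeeks/GeometryAlgorithms/Triangle/Count_Integral_points_inside_triangle.py | boundary_points
-- ===== SOURCE A (Python) =====
-- def boundary_points(a, b):
--     dx = abs(a[0] - b[0])  # x2 - x1
--     dy = abs(a[1] - b[1])  # y2 - y1
--
--     # Count lattice points on the line segment (a, b)
--     if dx == 0:
--        return dy
--     if dy == 0:
--        return dx
--
--     while dy:
--           dx, dy = dy, dx % dy
--     return dx
--
--     """(or)
--     from math import gcd
--     gcd(abs(a[0] - b[0]), abs(a[1] - b[1]))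
--     """
-- ===== SOURCE B (Python) =====
-- def boundary_points(a, b):
--     def _gcd(x, y):
--         return x if y == 0 else _gcd(y, x % y)
--     return _gcd(abs(a[0] - b[0]), abs(a[1] - b[1]))
-- ===== Notes on version B (the rewrite author's own statement) =====
-- stated objective: simpler
-- what changed: Replaces the while-loop with tuple reassignment and the two redundant dx==0/dy==0 early-return guards by a single direct recursive Euclidean gcd helper (gcd(0,n)=n subsumes the guards).
import Mathlib
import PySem

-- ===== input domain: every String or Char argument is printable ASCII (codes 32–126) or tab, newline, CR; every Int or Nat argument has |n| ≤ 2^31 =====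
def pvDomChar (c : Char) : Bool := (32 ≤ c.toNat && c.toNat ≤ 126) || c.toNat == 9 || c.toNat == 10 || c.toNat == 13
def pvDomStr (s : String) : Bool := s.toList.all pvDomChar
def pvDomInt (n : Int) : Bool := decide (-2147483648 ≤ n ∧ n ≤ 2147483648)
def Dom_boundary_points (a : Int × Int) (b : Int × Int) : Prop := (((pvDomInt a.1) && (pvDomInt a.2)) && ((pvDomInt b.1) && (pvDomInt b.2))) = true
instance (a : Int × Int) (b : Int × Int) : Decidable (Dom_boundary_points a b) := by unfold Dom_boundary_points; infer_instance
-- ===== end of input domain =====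

-- B replaces A's while-loop and redundant zero guards with one direct recursive Euclidean gcd helper (simpler decomposition, same cost).

-- ===== PORT A =====
theorem pvModAbsLt (a b : Int) (h : b ≠ 0) : (PySem.Int.mod a b).natAbs < b.natAbs := by
  rcases lt_or_gt_of_ne h with hb | hb
  · have := PySem.Int.mod_neg_bounds a hb
    omega
  · have h1 := PySem.Int.mod_nonneg a hb
    have h2 := PySem.Int.mod_lt a hb
    omega

-- the 'while dy: dx, dy = dy, dx % dy' loop of A
def pvLoopA (dx dy : Int) : Int :=
  if h : dy ≠ 0 then pvLoopA dy (PySem.Int.mod dx dy) else dx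
termination_by dy.natAbs
decreasing_by exact pvModAbsLt dx dy h

def boundary_points (a : Int × Int) (b : Int × Int) : Int :=
  let dx := |a.1 - b.1|
  let dy := |a.2 - b.2|
  if dx = 0 then dy
  else if dy = 0 then dx
  else pvLoopA dx dy

-- ===== PORT B =====
-- the nested recursive helper _gcd of B
def pvGcdB (x y : Int) : Int :=
  if h : y = 0 then x else pvGcdB y (PySem.Int.mod x y)
termination_by y.natAbs
decreasing_by exact pvModAbsLt x y h

def boundary_points_alt (a : Int × Int) (b : Int × Int) : Int :=
  pvGcdB (|a.1 - b.1|) (|a.2 - b.2|)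

-- ===== PRECONDITION & SPEC =====
def Spec_boundary_points (a : Int × Int) (b : Int × Int) (out : Int) : Prop := out = boundary_points_alt a b
instance (a : Int × Int) (b : Int × Int) (out : Int) : Decidable (Spec_boundary_points a b out) := by unfold Spec_boundary_points; infer_instance

-- ===== CLAIM (what is proved, stated in full; the proofs are below) =====
def Claim_equal_boundary_points : Prop := ∀ (a : Int × Int) (b : Int × Int), Dom_boundary_points a b → Spec_boundary_points a b (boundary_points a b)

-- ===== LEMMAS AND PROOFS =====
theorem pvLoopA_eq_gcdB (dx dy : Int) : pvLoopA dx dy = pvGcdB dx dy := by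
  fun_induction pvLoopA dx dy with
  | case1 dx dy h ih => rw [pvGcdB, dif_neg h]; exact ih
  | case2 dx dy h => rw [pvGcdB, dif_pos (by omega)]

theorem pvGcdB_zero_left (dy : Int) : pvGcdB 0 dy = dy := by
  by_cases h : dy = 0
  · rw [pvGcdB, dif_pos h, h]
  · have hm : PySem.Int.mod 0 dy = 0 := (PySem.Int.mod_eq_zero_iff_dvd 0 dy).mpr (dvd_zero dy)
    rw [pvGcdB, dif_neg h, hm, pvGcdB, dif_pos rfl]

theorem pvGcdB_zero_right (dx : Int) : pvGcdB dx 0 = dx := by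
  rw [pvGcdB, dif_pos rfl]

-- ===== VERDICT (by name: the statement is the Claim_ definition above) =====
theorem boundary_points_spec : Claim_equal_boundary_points := by
  intro a b _
  unfold Spec_boundary_points boundary_points boundary_points_alt
  by_cases hx : |a.1 - b.1| = 0
  · simp [hx, pvGcdB_zero_left]
  · by_cases hy : |a.2 - b.2| = 0
    · simp [hx, hy, pvGcdB_zero_right]
    · simp only [if_neg hx, if_neg hy, pvLoopA_eq_gcdB]
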